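-- pv_equiv track=rewrite | github.com/tala-k01/Capstone | your_utils_module.py | infer_mbti_from_mood
-- ===== SOURCE A (Python) =====
-- def infer_mbti_from_mood(mood_distribution):
--     mbti_scores = {
--         'E': 0, 'I': 0,
--         'S': 0, 'N': 0,
--         'T': 0, 'F': 0,
--         'J': 0, 'P': 0
--     }
--
--     trait_map = {
--         'joyful':     ['E', 'F', 'P'],
--         'energetic':  ['E', 'S', 'J'],
--         'calm':       ['I', 'F', 'P'],
--         'sad':        ['I', 'F'],
--         'melancholic':['I', 'N', 'T'],
--         'intense':    ['E', 'T', 'J'],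
--         'relaxed':    ['P', 'F', 'N'],
--         'hype':       ['E', 'S', 'J']
--     }
--
--     for mood, weight in mood_distribution.items():
--         traits = trait_map.get(mood, [])
--         for trait in traits:
--             mbti_scores[trait] += weight
--
--     mbti = ''
--     mbti += 'E' if mbti_scores['E'] >= mbti_scores['I'] else 'I'
--     mbti += 'S' if mbti_scores['S'] >= mbti_scores['N'] else 'N'
--     mbti += 'T' if mbti_scores['T'] >= mbti_scores['F'] else 'F'
--     mbti += 'J' if mbti_scores['J'] >= mbti_scores['P'] else 'P'
--
--     return mbti
-- ===== SOURCE B (Python) =====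
-- def infer_mbti_from_mood(mood_distribution):
--     trait_map = {
--         'joyful':     ['E', 'F', 'P'],
--         'energetic':  ['E', 'S', 'J'],
--         'calm':       ['I', 'F', 'P'],
--         'sad':        ['I', 'F'],
--         'melancholic':['I', 'N', 'T'],
--         'intense':    ['E', 'T', 'J'],
--         'relaxed':    ['P', 'F', 'N'],
--         'hype':       ['E', 'S', 'J']
--     }
--
--     def score(t):
--         return sum(weight for mood, weight in mood_distribution.items()
--                    if t in trait_map.get(mood, []))
--
--     return (('E' if score('E') >= score('I') else 'I')
--           + ('S' if score('S') >= score('N') else 'N')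
--           + ('T' if score('T') >= score('F') else 'F')
--           + ('J' if score('J') >= score('P') else 'P'))
-- ===== Notes on version B (the rewrite author's own statement) =====
-- stated objective: idiomatic
-- what changed: Replaces the single accumulating pass over the distribution that updates eight dict counters with a per-trait scoring helper (a filtered sum over the distribution), computed once per trait letter and assembled directly into the four-letter result.
import Mathlib
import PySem

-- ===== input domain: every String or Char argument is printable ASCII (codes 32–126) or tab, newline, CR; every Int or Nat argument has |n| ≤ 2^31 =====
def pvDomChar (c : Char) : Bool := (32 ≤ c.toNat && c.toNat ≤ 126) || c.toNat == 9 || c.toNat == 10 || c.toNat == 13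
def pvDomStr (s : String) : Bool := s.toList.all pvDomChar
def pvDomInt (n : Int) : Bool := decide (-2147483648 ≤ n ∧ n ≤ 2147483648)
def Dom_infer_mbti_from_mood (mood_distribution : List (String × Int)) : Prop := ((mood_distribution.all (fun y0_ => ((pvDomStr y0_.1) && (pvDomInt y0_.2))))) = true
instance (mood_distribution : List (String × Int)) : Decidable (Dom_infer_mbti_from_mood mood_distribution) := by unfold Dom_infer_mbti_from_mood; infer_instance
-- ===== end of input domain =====

-- B replaces A's single accumulating pass over eight dict counters by a per-trait filtered-sum
-- helper called once per trait letter (idiomatic decomposition; same exact integer results).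

-- ===== PORT A =====
-- trait_map.get(mood, []) — the literal dict of A, as a lookup function
def pvTraitMap (mood : String) : List String :=
  if mood = "joyful" then ["E", "F", "P"]
  else if mood = "energetic" then ["E", "S", "J"]
  else if mood = "calm" then ["I", "F", "P"]
  else if mood = "sad" then ["I", "F"]
  else if mood = "melancholic" then ["I", "N", "T"]
  else if mood = "intense" then ["E", "T", "J"]
  else if mood = "relaxed" then ["P", "F", "N"]
  else if mood = "hype" then ["E", "S", "J"]
  else []

-- mbti_scores: a dict with the eight fixed literal keys, all initialised to 0; ported as a
-- total score function String → Int (lookups in A only ever use those eight keys).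
def infer_mbti_from_mood (mood_distribution : List (String × Int)) : String :=
  let init : String → Int := fun _ => 0
  let scores : String → Int :=
    mood_distribution.foldl
      (fun s p =>
        (pvTraitMap p.1).foldl (fun s trait => fun k => if k = trait then s k + p.2 else s k) s)
      init
  "" ++ (if scores "E" ≥ scores "I" then "E" else "I")
     ++ (if scores "S" ≥ scores "N" then "S" else "N")
     ++ (if scores "T" ≥ scores "F" then "T" else "F")
     ++ (if scores "J" ≥ scores "P" then "J" else "P")

-- ===== PORT B =====
-- score(t) = sum(weight for mood, weight in mood_distribution.items() if t in trait_map.get(mood, []))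
def pvScore (mood_distribution : List (String × Int)) (t : String) : Int :=
  (((mood_distribution.filter (fun p => (pvTraitMap p.1).contains t)).map (fun p => p.2)).sum)

def infer_mbti_from_mood_alt (mood_distribution : List (String × Int)) : String :=
  (if pvScore mood_distribution "E" ≥ pvScore mood_distribution "I" then "E" else "I")
  ++ (if pvScore mood_distribution "S" ≥ pvScore mood_distribution "N" then "S" else "N")
  ++ (if pvScore mood_distribution "T" ≥ pvScore mood_distribution "F" then "T" else "F")
  ++ (if pvScore mood_distribution "J" ≥ pvScore mood_distribution "P" then "J" else "P")

-- ===== PRECONDITION & SPEC =====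
def Spec_infer_mbti_from_mood (mood_distribution : List (String × Int)) (out : String) : Prop := out = infer_mbti_from_mood_alt mood_distribution
instance (mood_distribution : List (String × Int)) (out : String) : Decidable (Spec_infer_mbti_from_mood mood_distribution out) := by unfold Spec_infer_mbti_from_mood; infer_instance

-- ===== CLAIM (what is proved, stated in full; the proofs are below) =====
def Claim_equal_infer_mbti_from_mood : Prop := ∀ (mood_distribution : List (String × Int)), Dom_infer_mbti_from_mood mood_distribution → Spec_infer_mbti_from_mood mood_distribution (infer_mbti_from_mood mood_distribution)

-- ===== LEMMAS AND PROOFS =====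

-- Inner trait loop: adds w to slot t once per occurrence of t in the trait list.
lemma pv_inner_fold (l : List String) (s : String → Int) (w : Int) (t : String) :
    (l.foldl (fun s trait => fun k => if k = trait then s k + w else s k) s) t
      = s t + (l.count t : Int) * w := by
  induction l generalizing s with
  | nil => simp
  | cons h tl ih =>
    simp only [List.foldl_cons, ih, List.count_cons]
    by_cases ht : t = h
    · simp only [ht, BEq.rfl, if_pos]
      push_cast; ring
    · simp [ht]
      exact Or.inl fun e => ht e.symm

-- Every trait list in the map is duplicate-free.
lemma pv_traitMap_nodup (m : String) : (pvTraitMap m).Nodup := by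
  unfold pvTraitMap; split_ifs <;> decide

lemma pv_count_eq_ite (m t : String) :
    ((pvTraitMap m).count t : Int) = if (pvTraitMap m).contains t then 1 else 0 := by
  by_cases h : t ∈ pvTraitMap m
  · simp [List.count_eq_one_of_mem (pv_traitMap_nodup m) h, h]
  · simp [List.count_eq_zero_of_not_mem h, h]

-- A's accumulated score at slot t equals the starting value plus B's filtered sum.
lemma pv_loop_eq (mood_distribution : List (String × Int)) (s : String → Int) (t : String) :
    (mood_distribution.foldl
      (fun s p =>
        (pvTraitMap p.1).foldl (fun s trait => fun k => if k = trait then s k + p.2 else s k) s)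
      s) t
    = s t + pvScore mood_distribution t := by
  induction mood_distribution generalizing s with
  | nil => simp [pvScore]
  | cons p tl ih =>
    simp only [List.foldl_cons, ih, pv_inner_fold, pv_count_eq_ite]
    unfold pvScore
    by_cases h : t ∈ pvTraitMap p.1 <;> simp [h] <;> ring

-- ===== VERDICT (by name: the statement is the Claim_ definition above) =====
theorem infer_mbti_from_mood_spec : Claim_equal_infer_mbti_from_mood := by
  intro md _
  show _ = _
  unfold infer_mbti_from_mood infer_mbti_from_mood_alt
  simp only [pv_loop_eq, zero_add]
  rfl
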